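-- pv_equiv track=rewrite | github.com/pypi-data/pypi-mirror-114 | packages/mf-gitvars/mf-gitvars-1.1.7.tar.gz/mf-gitvars-1.1.7/gitvars/printvars.py | get_missing_vars
-- ===== SOURCE A (Python) =====
-- from functools import reduce
-- from typing import Dict, Optional
--
-- def get_missing_vars(glvars: Dict[str, Dict[str, str]]):
--     def get_keys(ar: [str], k: str):
--         if k != "*":
--             return ar + list(glvars[k].keys())
--         else:
--             return ar
--
--     all_values = set(dict.fromkeys(reduce(get_keys, glvars, [])))
--     missingdict = {}
--     for envtype in glvars:
--         if envtype != "*":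
--             missingdict[envtype] = all_values - set(glvars[envtype])
--
--     return missingdict
-- ===== SOURCE B (Python) =====
-- def get_missing_vars(glvars):
--     # Inverted index: for every key, the set of (non-'*') environments that define it.
--     key_to_envs = {}
--     for envtype, d in glvars.items():
--         if envtype != "*":
--             for key in d:
--                 key_to_envs.setdefault(key, set()).add(envtype)
--     missingdict = {}
--     for envtype in glvars:
--         if envtype != "*":
--             missingdict[envtype] = {k for k, envs in key_to_envs.items() if envtype not in envs}
--     return missingdict
-- ===== Notes on version B (the rewrite author's own statement) =====
-- stated objective: alternative
-- what changed: B replaces A's single union-set plus per-environment set difference with an inverted index mapping each key to the set of environments that define it, then emits each environment's missing keys by scanning that index.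
import Mathlib
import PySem

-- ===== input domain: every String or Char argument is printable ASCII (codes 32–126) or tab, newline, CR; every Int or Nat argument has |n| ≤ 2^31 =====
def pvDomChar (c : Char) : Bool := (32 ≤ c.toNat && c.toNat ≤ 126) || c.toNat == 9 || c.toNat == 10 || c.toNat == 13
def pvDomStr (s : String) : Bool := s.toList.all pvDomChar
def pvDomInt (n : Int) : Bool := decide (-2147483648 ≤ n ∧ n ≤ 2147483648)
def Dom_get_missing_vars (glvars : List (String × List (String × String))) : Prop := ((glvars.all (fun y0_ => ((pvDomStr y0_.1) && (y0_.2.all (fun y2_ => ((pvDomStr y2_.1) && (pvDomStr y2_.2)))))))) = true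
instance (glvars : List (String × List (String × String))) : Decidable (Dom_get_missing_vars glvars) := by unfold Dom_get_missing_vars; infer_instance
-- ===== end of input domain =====

-- B builds an inverted index key → set of defining environments instead of A's union set + per-environment set difference ('alternative'; not measured faster).

-- ===== PORT A =====
-- glvars[k]: k is always a key of glvars where A evaluates this, so the total getD form is exact there.
def pvLookupA (glvars : List (String × List (String × String))) (k : String) : List (String × String) :=
  (PySem.Dict.mk glvars).getD k []

-- the reduce step get_keys(ar, k)
def pvGetKeysA (glvars : List (String × List (String × String))) (ar : List String) (k : String) : List String :=
  if k ≠ "*" then ar ++ (pvLookupA glvars k).map Prod.fst else ar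

def get_missing_vars (glvars : List (String × List (String × String))) : List (String × List String) :=
  -- all_values = set(dict.fromkeys(reduce(get_keys, glvars, [])))
  let all_values : PySem.Set String :=
    PySem.Set.ofList (PySem.List.dedup (glvars.foldl (fun ar p => pvGetKeysA glvars ar p.1) []))
  -- for envtype in glvars: if envtype != "*": missingdict[envtype] = all_values - set(glvars[envtype])
  (glvars.foldl (fun (md : PySem.Dict String (List String)) p =>
      if p.1 ≠ "*" then
        md.insert p.1 (PySem.Set.diff all_values (PySem.Set.ofList ((pvLookupA glvars p.1).map Prod.fst)))
      else md)
    PySem.Dict.empty).items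

-- ===== PORT B =====
-- one outer step of the index build: for key in glvars[envtype]: key_to_envs.setdefault(key, set()).add(envtype)
def pvStepB : PySem.Dict String (PySem.Set String) → (String × List (String × String)) → PySem.Dict String (PySem.Set String) :=
  fun kte p =>
    if p.1 ≠ "*" then
      p.2.foldl (fun kte kv => kte.modify kv.1 PySem.Set.empty (fun s => PySem.Set.add s p.1)) kte
    else kte

def pvIndexB (glvars : List (String × List (String × String))) : PySem.Dict String (PySem.Set String) :=
  glvars.foldl pvStepB PySem.Dict.empty

def get_missing_vars_alt (glvars : List (String × List (String × String))) : List (String × List String) :=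
  let kte := pvIndexB glvars
  -- missingdict[envtype] = {k for k, envs in key_to_envs.items() if envtype not in envs}
  (glvars.foldl (fun (md : PySem.Dict String (List String)) p =>
      if p.1 ≠ "*" then
        md.insert p.1 (PySem.Set.ofList ((kte.items.filter (fun q => !(PySem.Set.contains q.2 p.1))).map Prod.fst))
      else md)
    PySem.Dict.empty).items

-- ===== PRECONDITION & SPEC =====
-- Pre_ excludes association lists with duplicate environment names: the parameter is a Python dict,
-- whose keys are necessarily distinct, so this excludes no input the Python function can receive.
def Pre_get_missing_vars (glvars : List (String × List (String × String))) : Prop :=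
  (glvars.map Prod.fst).Nodup
instance (glvars : List (String × List (String × String))) : Decidable (Pre_get_missing_vars glvars) := by unfold Pre_get_missing_vars; infer_instance

def pvWitness_get_missing_vars : (List (String × List (String × String))) :=
  [("*", [("g", "1")]), ("dev", [("x", "1"), ("y", "2")]), ("prod", [("y", "3")])]

def Spec_get_missing_vars (glvars : List (String × List (String × String))) (out : List (String × List String)) : Prop := out = get_missing_vars_alt glvars
instance (glvars : List (String × List (String × String))) (out : List (String × List String)) : Decidable (Spec_get_missing_vars glvars out) := by unfold Spec_get_missing_vars; infer_instance

-- ===== CLAIM (what is proved, stated in full; the proofs are below) =====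
def Claim_equal_get_missing_vars : Prop := ∀ (glvars : List (String × List (String × String))), Dom_get_missing_vars glvars → Pre_get_missing_vars glvars → Spec_get_missing_vars glvars (get_missing_vars glvars)

-- ===== LEMMAS AND PROOFS =====

-- L0
theorem pv_lookup_eq (glvars : List (String × List (String × String)))
    (h : (glvars.map Prod.fst).Nodup) (p : String × List (String × String)) (hp : p ∈ glvars) :
    pvLookupA glvars p.1 = p.2 := by
  induction glvars with
  | nil => cases hp
  | cons q l ih =>
    simp only [List.map_cons, List.nodup_cons] at h
    rcases List.mem_cons.mp hp with rfl | hpl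
    · simp [pvLookupA, PySem.Dict.getD, PySem.Dict.get?]
    · have hne : q.1 ≠ p.1 := by
        intro he; exact h.1 (he ▸ List.mem_map_of_mem hpl)
      have := ih h.2 hpl
      have hb : (q.1 == p.1) = false := by simp [hne]
      simpa [pvLookupA, PySem.Dict.getD, PySem.Dict.get?, List.find?_cons, hb] using this

-- inner fold of the index build
theorem pv_inner_getD (e0 : String) (kvs : List (String × String))
    (d : PySem.Dict String (PySem.Set String)) (k : String) :
    ((kvs.foldl (fun d kv => d.modify kv.1 PySem.Set.empty (fun s => PySem.Set.add s e0)) d).getD k PySem.Set.empty)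
      = if k ∈ kvs.map Prod.fst then (d.getD k PySem.Set.empty).add e0 else d.getD k PySem.Set.empty := by
  induction kvs generalizing d with
  | nil => simp
  | cons kv rest ih =>
    simp only [List.foldl_cons, ih, List.map_cons, List.mem_cons]
    rw [PySem.Dict.getD_modify]
    by_cases hk : k = kv.1
    · simp [hk]
    · by_cases hr : k ∈ List.map Prod.fst rest <;> simp [hk, hr]

theorem pv_outer_getD (l : List (String × List (String × String)))
    (d : PySem.Dict String (PySem.Set String)) (k e : String) :
    (e ∈ (l.foldl pvStepB d).getD k PySem.Set.empty)
      ↔ (e ∈ d.getD k PySem.Set.empty ∨ ∃ p ∈ l, p.1 = e ∧ p.1 ≠ "*" ∧ k ∈ p.2.map Prod.fst) := by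
  induction l generalizing d with
  | nil => simp
  | cons p rest ih =>
    simp only [List.foldl_cons, ih, List.mem_cons]
    by_cases hs : p.1 = "*"
    · simp only [pvStepB, hs]
      simp only [ne_eq, not_true_eq_false, if_false]
      constructor
      · rintro (h | ⟨q, hq, h1, h2, h3⟩)
        · exact Or.inl h
        · exact Or.inr ⟨q, Or.inr hq, h1, h2, h3⟩
      · rintro (h | ⟨q, (rfl | hq), h1, h2, h3⟩)
        · exact Or.inl h
        · exact absurd hs h2
        · exact Or.inr ⟨q, hq, h1, h2, h3⟩
    · simp only [pvStepB, ne_eq, hs, not_false_eq_true, if_true]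
      constructor
      · rintro (h | ⟨q, hq, h1, h2, h3⟩)
        · rw [pv_inner_getD] at h
          by_cases hk : k ∈ p.2.map Prod.fst
          · rw [if_pos hk, PySem.Set.mem_add] at h
            rcases h with h | rfl
            · exact Or.inl h
            · exact Or.inr ⟨p, Or.inl rfl, rfl, hs, hk⟩
          · rw [if_neg hk] at h; exact Or.inl h
        · exact Or.inr ⟨q, Or.inr hq, h1, h2, h3⟩
      · rintro (h | ⟨q, (rfl | hq), h1, h2, h3⟩)
        · left; rw [pv_inner_getD]; split_ifs with hk
          · rw [PySem.Set.mem_add]; exact Or.inl h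
          · exact h
        · left; rw [pv_inner_getD, if_pos h3, PySem.Set.mem_add]; exact Or.inr h1.symm
        · exact Or.inr ⟨q, hq, h1, h2, h3⟩

def pvAllKeys (glvars : List (String × List (String × String))) : List String :=
  (glvars.filter (fun p => p.1 ≠ "*")).flatMap (fun p => p.2.map Prod.fst)

theorem pv_outer_keys (l : List (String × List (String × String)))
    (d : PySem.Dict String (PySem.Set String)) :
    (l.foldl pvStepB d).keys = PySem.Set.update d.keys (pvAllKeys l) := by
  induction l generalizing d with
  | nil => simp [pvAllKeys, PySem.Set.update_nil]
  | cons p rest ih =>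
    by_cases hs : p.1 = "*"
    · simp only [List.foldl_cons, pvStepB, ne_eq, hs, not_true_eq_false, if_false, ih]
      simp [pvAllKeys, hs]
    · simp only [List.foldl_cons, pvStepB, ne_eq, hs, not_false_eq_true, if_true, ih]
      rw [PySem.Dict.keys_foldl_modify_key p.2 Prod.fst PySem.Set.empty
        (fun _ _ => fun s => PySem.Set.add s p.1) d]
      have : pvAllKeys (p :: rest) = p.2.map Prod.fst ++ pvAllKeys rest := by
        simp [pvAllKeys, hs]
      rw [this, PySem.Set.update_append]

-- with nodup outer keys, an env entry is determined by its name
theorem pv_entry_unique (glvars : List (String × List (String × String)))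
    (h : (glvars.map Prod.fst).Nodup) {p q : String × List (String × String)}
    (hp : p ∈ glvars) (hq : q ∈ glvars) (he : p.1 = q.1) : p = q := by
  exact List.inj_on_of_nodup_map h hp hq he

-- A's reduce produces exactly the concatenation of the non-'*' key lists
theorem pv_allvalues_eq (glvars : List (String × List (String × String)))
    (h : (glvars.map Prod.fst).Nodup) :
    glvars.foldl (fun ar p => pvGetKeysA glvars ar p.1) [] = pvAllKeys glvars := by
  have h1 : glvars.foldl (fun ar p => pvGetKeysA glvars ar p.1) []
      = glvars.foldl (fun ar p => if p.1 ≠ "*" then ar ++ p.2.map Prod.fst else ar) [] := by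
    apply PySem.List.foldl_congr_mem
    intro acc p hp
    simp only [pvGetKeysA, pv_lookup_eq glvars h p hp]
  have h2 : glvars.foldl (fun ar p => if p.1 ≠ "*" then ar ++ p.2.map Prod.fst else ar) []
      = (glvars.filter (fun p => p.1 ≠ "*")).foldl (fun ar p => ar ++ p.2.map Prod.fst) [] := by
    rw [List.foldl_filter]
    apply PySem.List.foldl_congr_mem
    intro acc p _
    by_cases hs : p.1 = "*" <;> simp [hs]
  rw [h1, h2, PySem.List.foldl_append_eq_flatMap, List.nil_append, pvAllKeys]

theorem pv_index_keys (glvars : List (String × List (String × String))) :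
    (pvIndexB glvars).keys = PySem.Set.ofList (pvAllKeys glvars) := by
  rw [pvIndexB, pv_outer_keys]
  simp [PySem.Set.update_nil_left]

-- per-environment value equality
theorem pv_value_eq (glvars : List (String × List (String × String)))
    (h : (glvars.map Prod.fst).Nodup) (p : String × List (String × String))
    (hp : p ∈ glvars) (hs : p.1 ≠ "*") :
    PySem.Set.diff
      (PySem.Set.ofList (PySem.List.dedup (glvars.foldl (fun ar q => pvGetKeysA glvars ar q.1) [])))
      (PySem.Set.ofList ((pvLookupA glvars p.1).map Prod.fst))
    = PySem.Set.ofList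
        (((pvIndexB glvars).items.filter (fun q => !(PySem.Set.contains q.2 p.1))).map Prod.fst) := by
  have hAV : PySem.Set.ofList (PySem.List.dedup (glvars.foldl (fun ar q => pvGetKeysA glvars ar q.1) []))
      = (pvIndexB glvars).keys := by
    rw [pv_allvalues_eq glvars h, pv_index_keys]
    simp [PySem.List.dedup, PySem.Set.ofList_ofList]
  have hnodup : (pvIndexB glvars).keys.Nodup := by
    rw [pv_index_keys]; exact PySem.Set.nodup_ofList _
  -- B side: items → keys
  have hitems := PySem.Dict.items_eq_map_keys (pvIndexB glvars) hnodup PySem.Set.empty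
  rw [hitems, List.filter_map, List.map_map]
  have hfst : (Prod.fst ∘ fun k => (k, (pvIndexB glvars).getD k PySem.Set.empty)) = id := rfl
  rw [hfst, List.map_id]
  have hnodupf : ((pvIndexB glvars).keys.filter
      ((fun q => !(PySem.Set.contains q.2 p.1)) ∘ fun k => (k, (pvIndexB glvars).getD k PySem.Set.empty))).Nodup :=
    hnodup.filter _
  rw [PySem.Set.ofList_eq_self_of_nodup _ hnodupf]
  -- A side: diff = filter
  rw [hAV, pv_lookup_eq glvars h p hp, PySem.Set.diff]
  apply List.filter_congr
  intro k _
  congr 1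
  show (PySem.Set.ofList (List.map Prod.fst p.2)).contains k
    = PySem.Set.contains ((pvIndexB glvars).getD k PySem.Set.empty) p.1
  rw [PySem.Set.contains_eq_decide, PySem.Set.contains_eq_decide, decide_eq_decide]
  rw [PySem.Set.mem_ofList]
  rw [show (pvIndexB glvars) = glvars.foldl pvStepB PySem.Dict.empty from rfl, pv_outer_getD]
  simp only [PySem.Dict.getD_empty]
  constructor
  · intro hk
    exact Or.inr ⟨p, hp, rfl, hs, hk⟩
  · rintro (habs | ⟨q, hq, h1, h2, h3⟩)
    · simp [PySem.Set.empty] at habs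
    · have : q = p := pv_entry_unique glvars h hq hp h1
      exact this ▸ h3

-- items of the missingdict build, as a map over the non-'*' environments
theorem pv_items_fold {ν : Type} (glvars : List (String × List (String × String)))
    (h : (glvars.map Prod.fst).Nodup) (v : (String × List (String × String)) → ν) :
    (glvars.foldl (fun (md : PySem.Dict String ν) p => if p.1 ≠ "*" then md.insert p.1 (v p) else md) PySem.Dict.empty).items
    = (glvars.filter (fun p => p.1 ≠ "*")).map (fun p => (p.1, v p)) := by
  have hfold : glvars.foldl (fun (md : PySem.Dict String ν) p => if p.1 ≠ "*" then md.insert p.1 (v p) else md) PySem.Dict.empty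
      = (glvars.filter (fun p => p.1 ≠ "*")).foldl (fun md p => md.insert p.1 (v p)) PySem.Dict.empty := by
    rw [List.foldl_filter]
    apply PySem.List.foldl_congr_mem
    intro acc p _
    by_cases hs : p.1 = "*" <;> simp [hs]
  have hnodup : ((glvars.filter (fun p => p.1 ≠ "*")).map Prod.fst).Nodup :=
    List.Nodup.sublist ((List.filter_sublist).map Prod.fst) h
  rw [hfold, PySem.Dict.items_foldl_insert_fresh _ Prod.fst v PySem.Dict.empty
    (fun a _ => PySem.Dict.contains_empty _) hnodup]
  simp [PySem.Dict.empty]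

-- ===== VERDICT (by name: the statement is the Claim_ definition above) =====
theorem get_missing_vars_spec : Claim_equal_get_missing_vars := by
  intro glvars _ hpre
  show get_missing_vars glvars = get_missing_vars_alt glvars
  rw [get_missing_vars, get_missing_vars_alt]
  rw [pv_items_fold glvars hpre, pv_items_fold glvars hpre]
  apply List.map_congr_left
  intro p hp
  rcases List.mem_filter.mp hp with ⟨hpg, hps⟩
  have hps' : p.1 ≠ "*" := by simpa using hps
  exact congrArg (fun v => (p.1, v)) (pv_value_eq glvars hpre p hpg hps')
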